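-- pv_equiv track=rewrite | github.com/joenorton/sans | sans/sans/amendment/schemas.py | _validate_pointer
-- ===== SOURCE A (Python) =====
-- def _validate_pointer(path: str) -> str:
--     if path == "":
--         raise ValueError("path must be non-empty when present")
--     if not path.startswith("/"):
--         raise ValueError("path must start with '/'")
--     if path == "/":
--         return path
--     segments = path[1:].split("/")
--     for segment in segments:
--         i = 0
--         while i < len(segment):
--             if segment[i] == "~":
--                 if i + 1 >= len(segment) or segment[i + 1] not in {"0", "1"}:
--                     raise ValueError("path contains invalid RFC6901 escape")
--                 i += 2
--                 continue
--             i += 1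
--     return path
-- ===== SOURCE B (Python) =====
-- def _validate_pointer(path: str) -> str:
--     if path == "":
--         raise ValueError("path must be non-empty when present")
--     if not path.startswith("/"):
--         raise ValueError("path must start with '/'")
--     if path == "/":
--         return path
--     # every '~' must be immediately followed by '0' or '1'; splitting the whole
--     # path on '~' makes that "each chunk after the first starts with 0 or 1"
--     # (a '/' or end-of-string right after '~' fails this too, so no per-segment
--     # split is needed)
--     for chunk in path.split("~")[1:]:
--         if not chunk.startswith(("0", "1")):
--             raise ValueError("path contains invalid RFC6901 escape")
--     return path
-- ===== Notes on version B (the rewrite author's own statement) =====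
-- stated objective: simpler
-- what changed: B drops the per-segment split and index-skipping while-loop and instead splits the whole path once on '~', checking that every chunk after the first starts with '0' or '1' (a '/' or end of string right after '~' fails that test too, so the '/'-split is unnecessary).
import Mathlib
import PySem

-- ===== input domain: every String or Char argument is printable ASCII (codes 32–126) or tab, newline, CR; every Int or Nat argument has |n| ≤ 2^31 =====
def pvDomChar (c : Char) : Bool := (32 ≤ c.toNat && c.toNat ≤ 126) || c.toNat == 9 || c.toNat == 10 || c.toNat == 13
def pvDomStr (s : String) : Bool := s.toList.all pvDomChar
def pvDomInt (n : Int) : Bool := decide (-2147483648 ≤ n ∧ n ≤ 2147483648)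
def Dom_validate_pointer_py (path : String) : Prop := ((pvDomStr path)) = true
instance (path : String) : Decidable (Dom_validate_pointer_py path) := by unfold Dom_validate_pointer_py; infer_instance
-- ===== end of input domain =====

-- B replaces A's per-segment '/'-split and index-skipping while-loop by one split of the
-- whole path on '~', checking each later chunk starts with '0' or '1' (simpler, same cost).
-- On inputs excluded by Pre_ (A raises ValueError there) both ports return "".

-- ===== PORT A =====
-- A's while-loop over one segment: i is the index, stepping by 1, or by 2 after a valid
-- escape; the structural fuel (seg.length at the call site) only makes the loop total:
-- i grows by at least 1 per step, so fuel never runs out while i < seg.length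
def pvWhileA (seg : List Char) : Nat → Nat → Bool
  | _, 0 => true
  | i, fuel+1 =>
    if h : i < seg.length then
      if seg[i] = '~' then
        if i + 1 ≥ seg.length then false              -- raise ValueError
        else if h2 : i + 1 < seg.length then
          if seg[i+1] = '0' ∨ seg[i+1] = '1' then pvWhileA seg (i+2) fuel
          else false                                  -- raise ValueError
        else false
      else pvWhileA seg (i+1) fuel
    else true

def validate_pointer_py (path : String) : String :=
  if path = "" then ""                                  -- raise ValueError
  else if PySem.Str.startswith path "/" = false then "" -- raise ValueError
  else if path = "/" then path
  else
    let segments := PySem.Chars.splitOn (PySem.List.slice path.toList (some 1) none) "/".toList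
    if segments.all (fun s => pvWhileA s 0 s.length) then path else ""  -- raise ValueError in the loop

-- ===== PORT B =====
def validate_pointer_py_alt (path : String) : String :=
  if path = "" then ""                                  -- raise ValueError
  else if PySem.Str.startswith path "/" = false then "" -- raise ValueError
  else if path = "/" then path
  else
    let chunks := PySem.Chars.splitOn path.toList "~".toList
    if (chunks.drop 1).all
        (fun c => PySem.Chars.startswith c "0".toList || PySem.Chars.startswith c "1".toList)
    then path else ""                                   -- raise ValueError in the loop

-- ===== PRECONDITION & SPEC =====
-- Pre_ is exactly A's non-raising domain: the path starts with '/' and every '~' is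
-- immediately followed by '0' or '1'; outside it A raises ValueError.
def Pre_validate_pointer_py (path : String) : Prop :=
  PySem.Chars.startswith path.toList ['/'] = true ∧
  ∀ i ∈ List.range path.toList.length,
    path.toList[i]? = some '~' →
      (path.toList[i+1]? = some '0' ∨ path.toList[i+1]? = some '1')
instance (path : String) : Decidable (Pre_validate_pointer_py path) := by
  unfold Pre_validate_pointer_py; infer_instance
def pvWitness_validate_pointer_py : String := "/a~0b/c~1"

def Spec_validate_pointer_py (path : String) (out : String) : Prop := out = validate_pointer_py_alt path
instance (path : String) (out : String) : Decidable (Spec_validate_pointer_py path out) := by unfold Spec_validate_pointer_py; infer_instance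

-- ===== CLAIM (what is proved, stated in full; the proofs are below) =====
def Claim_equal_validate_pointer_py : Prop := ∀ (path : String), Dom_validate_pointer_py path → Pre_validate_pointer_py path → Spec_validate_pointer_py path (validate_pointer_py path)

-- ===== LEMMAS AND PROOFS =====

-- head of the list is '0' or '1'
def pvNextOk : List Char → Bool
  | [] => false
  | y :: _ => y == '0' || y == '1'

-- every '~' is immediately followed by '0' or '1' (structural form of Pre_'s condition)
def pvOk : List Char → Bool
  | [] => true
  | x :: xs => (x != '~' || pvNextOk xs) && pvOk xs

-- simple structural single-character split (reference model for PySem.Chars.splitOn)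
def pvSplit (c : Char) : List Char → List Char → List (List Char)
  | [], cur => [cur.reverse]
  | x :: xs, cur => if x = c then cur.reverse :: pvSplit c xs [] else pvSplit c xs (x :: cur)

theorem pvGo_spec (c : Char) (fuel : Nat) :
    ∀ (l cur : List Char) (acc : List (List Char)), l.length < fuel →
      PySem.Chars.splitOn.go [c] fuel l cur acc = acc.reverse ++ pvSplit c l cur := by
  induction fuel with
  | zero => intro l cur acc h; omega
  | succ n ih =>
    intro l cur acc h
    cases l with
    | nil => simp [PySem.Chars.splitOn.go, pvSplit]
    | cons x xs =>
      rw [PySem.Chars.splitOn.go]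
      by_cases hx : x = c
      · subst hx
        have : List.isPrefixOf [x] (x :: xs) = true := by simp [List.isPrefixOf]
        simp only [this, if_pos, List.length_cons, List.length_nil, List.drop_succ_cons,
          List.drop_zero]
        rw [ih xs [] (cur.reverse :: acc) (by simpa using Nat.lt_of_succ_lt_succ h)]
        simp [pvSplit]
      · have : List.isPrefixOf [c] (x :: xs) = false := by
          simp [List.isPrefixOf]; exact fun hh => (hx hh.symm).elim
        rw [if_neg (by simp [this])]
        rw [ih xs (x :: cur) acc (by simpa using Nat.lt_of_succ_lt_succ h)]
        simp [pvSplit, hx]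

theorem pvSplitOn_eq (c : Char) (l : List Char) :
    PySem.Chars.splitOn l [c] = pvSplit c l [] := by
  rw [PySem.Chars.splitOn, pvGo_spec c _ l [] [] (by omega)]
  simp

theorem pvOk_cons_iff (x : Char) (xs : List Char) :
    pvOk (x :: xs) = true ↔ (x = '~' → pvNextOk xs = true) ∧ pvOk xs = true := by
  rw [pvOk, Bool.and_eq_true, Bool.or_eq_true]
  constructor
  · rintro ⟨h1, h2⟩
    refine ⟨?_, h2⟩
    intro hx; subst hx
    rcases h1 with h1 | h1
    · simp at h1
    · exact h1
  · rintro ⟨h1, h2⟩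
    refine ⟨?_, h2⟩
    by_cases hx : x = '~'
    · exact Or.inr (h1 hx)
    · exact Or.inl (by simp [hx])

theorem pvOk_of_pre (L : List Char)
    (h : ∀ i ∈ List.range L.length, L[i]? = some '~' → (L[i+1]? = some '0' ∨ L[i+1]? = some '1')) :
    pvOk L = true := by
  induction L with
  | nil => rfl
  | cons x xs ih =>
    rw [pvOk_cons_iff]
    refine ⟨?_, ih ?_⟩
    · intro hx; subst hx
      have h0 := h 0 (by simp) (by simp)
      cases xs with
      | nil => simp at h0
      | cons y ys =>
        simp at h0
        rcases h0 with h0 | h0 <;> simp [pvNextOk, h0]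
    · intro i hi hget
      have := h (i+1) (by simp at hi ⊢; omega) (by simpa using hget)
      simpa using this

theorem pvOk_drop_one (L : List Char) (h : pvOk L = true) : pvOk (L.drop 1) = true := by
  cases L with
  | nil => exact h
  | cons x xs => exact ((pvOk_cons_iff x xs).mp h).2

theorem pvNextOk_append (A B : List Char) (h : A ≠ []) : pvNextOk (A ++ B) = pvNextOk A := by
  cases A with
  | nil => exact absurd rfl h
  | cons a A' => rfl

theorem pvNextOk_rev_app (cur B : List Char) (h : cur ≠ []) :
    pvNextOk (cur.reverse ++ B) = pvNextOk cur.reverse :=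
  pvNextOk_append _ _ (by simp [h])

theorem pvNextOk_rev_cons (x : Char) (cur : List Char) (h : cur ≠ []) :
    pvNextOk ((x :: cur).reverse) = pvNextOk cur.reverse := by
  rw [List.reverse_cons]
  exact pvNextOk_append _ _ (by simp [h])

theorem pvOk_append_elim (A B : List Char) (h : pvOk (A ++ B) = true) :
    pvOk B = true ∧ (pvNextOk B = false → pvOk A = true) ∧
    (∀ xs, B = '~' :: xs → pvNextOk xs = true) := by
  induction A with
  | nil =>
    refine ⟨h, fun _ => rfl, ?_⟩
    intro xs hB; subst hB
    exact ((pvOk_cons_iff _ _).mp h).1 rfl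
  | cons a A' ih =>
    rw [List.cons_append, pvOk_cons_iff] at h
    obtain ⟨h1, h2⟩ := h
    obtain ⟨hB, hA', hT⟩ := ih h2
    refine ⟨hB, ?_, hT⟩
    intro hnB
    rw [pvOk_cons_iff]
    refine ⟨?_, hA' hnB⟩
    intro hx
    have h1' := h1 hx
    cases A' with
    | nil => rw [List.nil_append] at h1'; rw [hnB] at h1'; cases h1'
    | cons b B' => rw [pvNextOk_append _ _ (by simp)] at h1'; exact h1'

-- segments of the '/'-split of an ok list are ok
theorem pvSegments_ok (M : List Char) : ∀ (cur : List Char), pvOk (cur.reverse ++ M) = true →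
    ∀ s ∈ pvSplit '/' M cur, pvOk s = true := by
  induction M with
  | nil =>
    intro cur h s hs
    simp [pvSplit] at hs; subst hs
    simpa using h
  | cons x xs ih =>
    intro cur h s hs
    rw [pvSplit] at hs
    by_cases hx : x = '/'
    · subst hx
      rw [if_pos rfl] at hs
      obtain ⟨hB, hA, _⟩ := pvOk_append_elim cur.reverse ('/' :: xs) h
      rcases List.mem_cons.mp hs with hs | hs
      · subst hs; exact hA rfl
      · have hxs : pvOk xs = true := ((pvOk_cons_iff _ _).mp hB).2
        exact ih [] (by simpa using hxs) s hs
    · rw [if_neg hx] at hs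
      refine ih (x :: cur) ?_ s hs
      simpa using h

-- chunks of the '~'-split of an ok list all start with '0' or '1' (past the first chunk)
theorem pvChunks_ok (M : List Char) : ∀ (cur : List Char), pvOk (cur.reverse ++ M) = true →
    (pvNextOk (cur.reverse ++ M) = true → ∀ s ∈ pvSplit '~' M cur, pvNextOk s = true) ∧
    (∀ s ∈ (pvSplit '~' M cur).drop 1, pvNextOk s = true) := by
  induction M with
  | nil =>
    intro cur h
    constructor
    · intro hn s hs
      simp [pvSplit] at hs; subst hs
      simpa using hn
    · intro s hs; simp [pvSplit] at hs
  | cons x xs ih =>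
    intro cur h
    by_cases hx : x = '~'
    · subst hx
      obtain ⟨hB, _, hT⟩ := pvOk_append_elim cur.reverse ('~' :: xs) h
      have hxs : pvOk xs = true := ((pvOk_cons_iff _ _).mp hB).2
      have hnxs : pvNextOk xs = true := hT xs rfl
      have hrec := (ih [] (by simpa using hxs)).1 (by simpa using hnxs)
      constructor
      · intro hn s hs
        rw [pvSplit, if_pos rfl] at hs
        rcases List.mem_cons.mp hs with hs | hs
        · subst hs
          cases cur with
          | nil => simp [pvNextOk] at hn
          | cons a A => rw [pvNextOk_rev_app _ _ (by simp)] at hn; exact hn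
        · exact hrec s hs
      · intro s hs
        rw [pvSplit, if_pos rfl, List.drop_one, List.tail_cons] at hs
        exact hrec s hs
    · have h' : pvOk ((x :: cur).reverse ++ xs) = true := by simpa using h
      have hrec := ih (x :: cur) h'
      constructor
      · intro hn s hs
        rw [pvSplit, if_neg hx] at hs
        refine hrec.1 ?_ s hs
        cases cur with
        | nil => simpa using hn
        | cons a A =>
          rw [pvNextOk_rev_app _ _ (by simp)] at hn
          rw [pvNextOk_rev_app _ _ (by simp), pvNextOk_rev_cons _ _ (by simp)]
          exact hn
      · intro s hs
        rw [pvSplit, if_neg hx] at hs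
        exact hrec.2 s hs

theorem pvWhileA_of_ok (seg : List Char) : ∀ (fuel i : Nat), seg.length ≤ i + fuel →
    pvOk (seg.drop i) = true → pvWhileA seg i fuel = true := by
  intro fuel
  induction fuel with
  | zero => intro i _ _; rfl
  | succ n ih =>
    intro i hfi h
    rw [pvWhileA]
    split
    · rename_i hi
      have hdrop : seg.drop i = seg[i] :: seg.drop (i+1) :=
        (List.getElem_cons_drop (as := seg) (i := i) hi).symm
      rw [hdrop] at h
      obtain ⟨h1, h2⟩ := (pvOk_cons_iff _ _).mp h
      by_cases ht : seg[i] = '~'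
      · rw [if_pos ht]
        have hn := h1 ht
        have hi1 : i + 1 < seg.length := by
          by_contra hc
          rw [List.drop_eq_nil_of_le (by omega)] at hn
          exact absurd hn (by simp [pvNextOk])
        rw [if_neg (by omega), dif_pos hi1]
        have hdrop1 : seg.drop (i+1) = seg[i+1] :: seg.drop (i+2) :=
          (List.getElem_cons_drop (as := seg) (i := i+1) hi1).symm
        rw [hdrop1] at hn h2
        have h01 : seg[i+1] = '0' ∨ seg[i+1] = '1' := by
          simpa [pvNextOk] using hn
        rw [if_pos h01]
        exact ih (i+2) (by omega) ((pvOk_cons_iff _ _).mp h2).2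
      · rw [if_neg ht]
        exact ih (i+1) (by omega) h2
    · rfl

theorem pvNextOk_eq_startswith (s : List Char) :
    pvNextOk s = (PySem.Chars.startswith s "0".toList || PySem.Chars.startswith s "1".toList) := by
  cases s with
  | nil => rfl
  | cons y ys =>
    show (y == '0' || y == '1') = _
    rw [show PySem.Chars.startswith (y :: ys) "0".toList = (y == '0') from by
          simp [PySem.Chars.startswith, List.isPrefixOf]; by_cases h : y = '0'
          · simp [h]
          · simp [h, Ne.symm h],
        show PySem.Chars.startswith (y :: ys) "1".toList = (y == '1') from by
          simp [PySem.Chars.startswith, List.isPrefixOf]; by_cases h : y = '1'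
          · simp [h]
          · simp [h, Ne.symm h]]

theorem pvSlice_one (L : List Char) :
    PySem.List.slice L (some 1) none = L.drop 1 := by
  simp [pysem]

-- ===== VERDICT (by name: the statement is the Claim_ definition above) =====
theorem validate_pointer_py_spec : Claim_equal_validate_pointer_py := by
  intro path _ hpre
  obtain ⟨hsw, hok0⟩ := hpre
  have hOkL : pvOk path.toList = true := pvOk_of_pre _ hok0
  have hne : path ≠ "" := by
    intro h; subst h
    exact absurd hsw (by decide)
  have hA : (PySem.Chars.splitOn (PySem.List.slice path.toList (some 1) none) "/".toList).all
      (fun s => pvWhileA s 0 s.length) = true := by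
    rw [pvSlice_one, show ("/".toList : List Char) = ['/'] from rfl, pvSplitOn_eq]
    refine List.all_eq_true.mpr ?_
    intro s hs
    exact pvWhileA_of_ok s s.length 0 (by omega)
      (by simpa using pvSegments_ok _ [] (by simpa using pvOk_drop_one _ hOkL) s hs)
  have hB : ((PySem.Chars.splitOn path.toList "~".toList).drop 1).all
      (fun c => PySem.Chars.startswith c "0".toList || PySem.Chars.startswith c "1".toList)
      = true := by
    rw [show ("~".toList : List Char) = ['~'] from rfl, pvSplitOn_eq]
    refine List.all_eq_true.mpr ?_
    intro s hs
    rw [← pvNextOk_eq_startswith]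
    exact (pvChunks_ok path.toList [] (by simpa using hOkL)).2 s hs
  unfold Spec_validate_pointer_py validate_pointer_py validate_pointer_py_alt
  by_cases hroot : path = "/"
  · simp [hroot]
  · have hA' : ∀ x ∈ PySem.Chars.splitOn (PySem.List.slice path.toList (some 1)) ['/'],
        pvWhileA x 0 x.length = true := by simpa using hA
    have hB' : ∀ x ∈ (PySem.Chars.splitOn path.toList ['~']).tail,
        PySem.Chars.startswith x ['0'] = true ∨ PySem.Chars.startswith x ['1'] = true := by
      simpa using hB
    simp [hne, hsw, hroot]
    rw [if_pos hA', if_pos hB']
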